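-- pv_equiv track=rewrite | github.com/costasbowgen/MA4K8 | Historical Vol main code.py | GroupByExpiration
-- ===== SOURCE A (Python) =====
-- def GroupByExpiration(inputList):
--     expiration_groups = {}
--     for entry in inputList:
--         expiration_day = entry[1]
--         if expiration_day not in expiration_groups:
--             expiration_groups[expiration_day] = []
--         expiration_groups[expiration_day].append(entry)
--     return expiration_groups
-- ===== SOURCE B (Python) =====
-- def GroupByExpiration(inputList):
--     # Two-pass: collect distinct expiration days in first-occurrence order,
--     # then build each group by filtering the input once per key.
--     seen = []
--     for e in inputList:
--         if e[1] not in seen: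
--             seen.append(e[1])
--     return {k: [e for e in inputList if e[1] == k] for k in seen}
-- ===== Notes on version B (the rewrite author's own statement) =====
-- stated objective: alternative
-- what changed: Replaces A's single-pass scatter into a growing dict of mutable lists by a two-pass scheme: first collect the distinct expiration days in first-occurrence order, then build each group with one filter of the input per key.
import Mathlib
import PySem

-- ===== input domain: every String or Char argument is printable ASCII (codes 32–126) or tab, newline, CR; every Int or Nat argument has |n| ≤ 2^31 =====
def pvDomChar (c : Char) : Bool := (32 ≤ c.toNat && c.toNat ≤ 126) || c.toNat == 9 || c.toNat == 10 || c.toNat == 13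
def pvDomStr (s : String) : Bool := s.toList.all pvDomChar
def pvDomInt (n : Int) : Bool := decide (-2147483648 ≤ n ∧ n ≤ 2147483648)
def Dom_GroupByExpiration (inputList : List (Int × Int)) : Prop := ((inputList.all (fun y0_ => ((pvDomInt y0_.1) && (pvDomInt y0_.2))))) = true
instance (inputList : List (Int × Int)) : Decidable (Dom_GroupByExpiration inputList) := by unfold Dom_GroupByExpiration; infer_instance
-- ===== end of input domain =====

-- B replaces A's single-pass scatter into a dict of growing lists by collecting the
-- distinct keys first and then filtering the input once per key (alternative decomposition).


-- ===== PORT A =====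
-- for entry in inputList: if entry[1] not in d: d[entry[1]] = []; d[entry[1]].append(entry)
def GroupByExpiration (inputList : List (Int × Int)) : List (Int × List (Int × Int)) :=
  (inputList.foldl
    (fun d e =>
      (if ¬ d.contains e.2 then d.insert e.2 [] else d).modify e.2 [] (· ++ [e]))
    PySem.Dict.empty).items

-- ===== PORT B =====
-- seen: distinct keys in first-occurrence order; then a dict comprehension over seen.
-- (seen is Nodup, so the dict comprehension's items are exactly this map.)
def GroupByExpiration_alt (inputList : List (Int × Int)) : List (Int × List (Int × Int)) :=
  let seen : PySem.Set Int :=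
    inputList.foldl (fun ks e => PySem.Set.add ks e.2) PySem.Set.empty
  seen.map (fun k => (k, inputList.filter (fun e => e.2 == k)))

-- ===== PRECONDITION & SPEC =====
def Spec_GroupByExpiration (inputList : List (Int × Int)) (out : List (Int × List (Int × Int))) : Prop := out = GroupByExpiration_alt inputList
instance (inputList : List (Int × Int)) (out : List (Int × List (Int × Int))) : Decidable (Spec_GroupByExpiration inputList out) := by unfold Spec_GroupByExpiration; infer_instance

-- ===== CLAIM (what is proved, stated in full; the proofs are below) =====
def Claim_equal_GroupByExpiration : Prop := ∀ (inputList : List (Int × Int)), Dom_GroupByExpiration inputList → Spec_GroupByExpiration inputList (GroupByExpiration inputList)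

-- ===== LEMMAS AND PROOFS =====

-- A's loop body, named for the lemmas below.
def pvStep (d : PySem.Dict Int (List (Int × Int))) (e : Int × Int) : PySem.Dict Int (List (Int × Int)) :=
  (if ¬ d.contains e.2 then d.insert e.2 [] else d).modify e.2 [] (· ++ [e])

theorem keys_pvStep (d : PySem.Dict Int (List (Int × Int))) (e : Int × Int) :
    (pvStep d e).keys = PySem.Set.add d.keys e.2 := by
  unfold pvStep
  by_cases h : d.contains e.2
  · have hm : e.2 ∈ d.keys := (PySem.Dict.contains_iff_mem_keys d e.2).mp h
    rw [if_neg (by simp [h]), PySem.Dict.keys_modify,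
        PySem.Dict.keys_insert_of_contains _ _ h, PySem.Set.add_of_mem hm]
  · have hf : d.contains e.2 = false := by simpa using h
    have hm : e.2 ∉ d.keys := fun hmem => h ((PySem.Dict.contains_iff_mem_keys d e.2).mpr hmem)
    rw [if_pos (by simp [hf]), PySem.Dict.keys_modify,
        PySem.Dict.keys_insert_of_contains _ _ (PySem.Dict.contains_insert_self d e.2 []),
        PySem.Dict.keys_insert_of_not_contains _ _ hf, PySem.Set.add_of_not_mem hm]

theorem getD_pvStep (d : PySem.Dict Int (List (Int × Int))) (e : Int × Int) (c : Int) :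
    (pvStep d e).getD c [] = d.getD c [] ++ (if e.2 == c then [e] else []) := by
  unfold pvStep
  by_cases h : d.contains e.2
  · rw [if_neg (by simp [h]), PySem.Dict.getD_modify]
    by_cases hc : c = e.2
    · simp [hc]
    · rw [if_neg hc, show (e.2 == c) = false from beq_eq_false_iff_ne.mpr (Ne.symm hc)]
      simp
  · have hf : d.contains e.2 = false := by simpa using h
    rw [if_pos (by simp [hf]), PySem.Dict.getD_modify]
    by_cases hc : c = e.2
    · subst hc
      simp [PySem.Dict.getD_of_not_contains d _ hf]
    · rw [if_neg hc, PySem.Dict.getD_insert, if_neg hc,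
          show (e.2 == c) = false from beq_eq_false_iff_ne.mpr (Ne.symm hc)]
      simp

theorem keys_foldl_pvStep (l : List (Int × Int)) (d : PySem.Dict Int (List (Int × Int))) :
    (l.foldl pvStep d).keys = l.foldl (fun ks e => PySem.Set.add ks e.2) d.keys := by
  induction l generalizing d with
  | nil => rfl
  | cons e l ih => simp [List.foldl, ih, keys_pvStep]

theorem getD_foldl_pvStep (l : List (Int × Int)) (d : PySem.Dict Int (List (Int × Int))) (c : Int) :
    (l.foldl pvStep d).getD c [] = d.getD c [] ++ l.filter (fun e => e.2 == c) := by
  induction l generalizing d with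
  | nil => simp
  | cons e l ih =>
    simp only [List.foldl, ih, getD_pvStep, List.filter]
    by_cases h : e.2 == c <;> simp [h]

-- ===== VERDICT (by name: the statement is the Claim_ definition above) =====
theorem GroupByExpiration_spec : Claim_equal_GroupByExpiration := by
  intro l _
  unfold Spec_GroupByExpiration GroupByExpiration GroupByExpiration_alt
  have hfold : l.foldl (fun d e => (if ¬ d.contains e.2 then d.insert e.2 [] else d).modify e.2 [] (· ++ [e])) PySem.Dict.empty = l.foldl pvStep PySem.Dict.empty := rfl
  rw [hfold]
  have hkeys : (l.foldl pvStep PySem.Dict.empty).keys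
      = l.foldl (fun ks e => PySem.Set.add ks e.2) PySem.Set.empty := by
    simpa using keys_foldl_pvStep l PySem.Dict.empty
  have hnodup : (l.foldl pvStep PySem.Dict.empty).keys.Nodup := by
    rw [hkeys, ← PySem.Set.update_map_eq_foldl_add,
      show (PySem.Set.empty : PySem.Set Int) = [] from rfl, PySem.Set.update_nil_left]
    exact PySem.Set.nodup_ofList _
  have hitems := PySem.Dict.items_eq_map_keys (l.foldl pvStep PySem.Dict.empty) hnodup ([] : List (Int × Int))
  rw [hitems, hkeys]
  apply List.map_congr_left
  intro k _
  simp [getD_foldl_pvStep l PySem.Dict.empty k]
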